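-- pv_equiv track=rewrite | github.com/Kizorat/LearningGrid | Dataset/dataset_generator.py | build_grid_empty
-- ===== SOURCE A (Python) =====
-- def build_grid_empty(size: int):
--     grid = [[" " for _ in range(size)] for _ in range(size)]
--
--     for i in range(size):
--         grid[0][i] = "#"
--         grid[size - 1][i] = "#"
--         grid[i][0] = "#"
--         grid[i][size - 1] = "#"
--
--     return grid
-- ===== SOURCE B (Python) =====
-- def build_grid_empty(size: int):
--     grid = []
--     for i in range(size):
--         if i == 0 or i == size - 1:
--             grid.append(["#"] * size)
--         else:
--             row = [" "] * size
--             row[0] = "#"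
--             row[size - 1] = "#"
--             grid.append(row)
--     return grid
-- ===== Notes on version B (the rewrite author's own statement) =====
-- stated objective: simpler
-- what changed: B builds the grid row-by-row, classifying each row as border (full '#') or interior (' ' row with '#' at both ends) in one pass, instead of A's fill-everything-with-spaces then overwrite the four borders by indexed assignment.
import Mathlib
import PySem

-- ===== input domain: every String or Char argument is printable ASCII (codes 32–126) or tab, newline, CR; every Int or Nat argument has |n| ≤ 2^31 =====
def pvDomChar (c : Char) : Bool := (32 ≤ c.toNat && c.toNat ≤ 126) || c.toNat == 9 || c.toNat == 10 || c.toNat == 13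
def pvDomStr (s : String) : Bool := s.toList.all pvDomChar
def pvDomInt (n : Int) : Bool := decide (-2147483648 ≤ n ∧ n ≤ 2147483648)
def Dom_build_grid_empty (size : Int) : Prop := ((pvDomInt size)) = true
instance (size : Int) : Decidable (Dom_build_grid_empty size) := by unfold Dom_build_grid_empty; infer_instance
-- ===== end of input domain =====

-- B builds the grid row-by-row (border rows vs interior rows) instead of A's
-- fill-with-spaces-then-overwrite-the-border; same result, simpler single classification pass.

-- ===== PORT A =====
-- Python A: grid = [[" "]*size]*size (as comprehensions), then for i in range(size)
-- set grid[0][i], grid[size-1][i], grid[i][0], grid[i][size-1] to "#".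
-- The `.toNat` on the assignment indices is exact: whenever the loop body runs,
-- size ≥ 1 and every index used (0, i, size-1) is nonnegative and in range.
def build_grid_empty (size : Int) : List (List String) :=
  let grid := (PySem.List.pyRange 0 size 1).map
    (fun _ => (PySem.List.pyRange 0 size 1).map (fun _ => " "))
  (PySem.List.pyRange 0 size 1).foldl (fun g i =>
    let g := g.modify 0 (fun row => row.set i.toNat "#")
    let g := g.modify (size - 1).toNat (fun row => row.set i.toNat "#")
    let g := g.modify i.toNat (fun row => row.set 0 "#")
    g.modify i.toNat (fun row => row.set (size - 1).toNat "#")) grid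

-- ===== PORT B =====
-- Python B: one loop over i in range(size); border rows appended whole, interior
-- rows built as [" "]*size with the two end cells set.  Same `.toNat` exactness note.
def build_grid_empty_alt (size : Int) : List (List String) :=
  (PySem.List.pyRange 0 size 1).foldl (fun grid i =>
    if i = 0 ∨ i = size - 1 then
      grid ++ [List.replicate size.toNat "#"]
    else
      grid ++ [((List.replicate size.toNat " ").set 0 "#").set (size - 1).toNat "#"]) []

-- ===== PRECONDITION & SPEC =====
def Spec_build_grid_empty (size : Int) (out : List (List String)) : Prop := out = build_grid_empty_alt size
instance (size : Int) (out : List (List String)) : Decidable (Spec_build_grid_empty size out) := by unfold Spec_build_grid_empty; infer_instance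

-- ===== CLAIM (what is proved, stated in full; the proofs are below) =====
def Claim_equal_build_grid_empty : Prop := ∀ (size : Int), Dom_build_grid_empty size → Spec_build_grid_empty size (build_grid_empty size)

-- ===== LEMMAS AND PROOFS =====

-- the border cell value after the first k loop iterations of A
def pvCell (n k r c : Nat) : String :=
  if ((r = 0 ∨ r = n - 1) ∧ c < k) ∨ ((c = 0 ∨ c = n - 1) ∧ r < k) then "#" else " "

def pvGrid (n k : Nat) : List (List String) :=
  (List.range n).map (fun r => (List.range n).map (fun c => pvCell n k r c))

lemma map_range_modify {α : Type} (n r : Nat) (_hr : r < n) (f : Nat → α) (g : α → α) :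
    ((List.range n).map f).modify r g
      = (List.range n).map (fun r' => if r' = r then g (f r') else f r') := by
  apply List.ext_getElem (by simp)
  intro j h1 _
  simp only [List.getElem_modify, List.getElem_map, List.getElem_range] at *
  by_cases h : r = j
  · simp [h]
  · simp [h, Ne.symm h]

lemma map_range_set {α : Type} (n c : Nat) (_hc : c < n) (f : Nat → α) (v : α) :
    ((List.range n).map f).set c v
      = (List.range n).map (fun c' => if c' = c then v else f c') := by
  apply List.ext_getElem (by simp)
  intro j h1 _
  simp only [List.getElem_set, List.getElem_map, List.getElem_range] at *
  by_cases h : c = j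
  · simp [h]
  · simp [h, Ne.symm h]

-- one iteration of A's loop advances pvGrid
lemma pvStep (n k : Nat) (hk : k < n) :
    ((((pvGrid n k).modify 0 (fun row => row.set k "#")).modify (n - 1)
        (fun row => row.set k "#")).modify k (fun row => row.set 0 "#")).modify k
        (fun row => row.set (n - 1) "#") = pvGrid n (k + 1) := by
  have hn0 : 0 < n := by omega
  have hn1 : n - 1 < n := Nat.sub_lt hn0 one_pos
  unfold pvGrid
  rw [map_range_modify n 0 hn0, map_range_modify n (n-1) hn1,
      map_range_modify n k hk, map_range_modify n k hk]
  apply List.map_congr_left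
  intro r hr
  rw [List.mem_range] at hr
  split_ifs <;>
    (try simp only [map_range_set n k hk, map_range_set n 0 hn0, map_range_set n (n-1) hn1]) <;>
    (apply List.map_congr_left
     intro c hc
     rw [List.mem_range] at hc
     unfold pvCell
     split_ifs <;> first | rfl | omega)

def pvStepN (n : Nat) (g : List (List String)) (k : Nat) : List (List String) :=
  (((g.modify 0 (fun row => row.set k "#")).modify (n - 1)
      (fun row => row.set k "#")).modify k (fun row => row.set 0 "#")).modify k
      (fun row => row.set (n - 1) "#")

lemma pvLoopA (n : Nat) : ∀ j k, k + j = n →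
    List.foldl (pvStepN n) (pvGrid n k) (List.range' k j) = pvGrid n n := by
  intro j
  induction j with
  | zero =>
    intro k h
    simp only [List.range'_zero, List.foldl_nil]
    rw [show k = n from by omega]
  | succ j ih =>
    intro k h
    rw [List.range'_succ, List.foldl_cons, show pvStepN n (pvGrid n k) k = pvGrid n (k+1) from
      pvStep n k (by omega)]
    exact ih (k+1) (by omega)

lemma pvA_eq (n : Nat) (hn : 1 ≤ n) : build_grid_empty (n : Int) = pvGrid n n := by
  unfold build_grid_empty
  rw [PySem.List.pyRange_zero_nat, List.foldl_map]
  simp only [List.map_const', List.length_map, List.length_range]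
  rw [show List.replicate n (List.replicate n (" " : String)) = pvGrid n 0 from by
    simp [pvGrid, pvCell, List.map_const']]
  refine (List.foldl_ext _ (pvStepN n) _ ?_).trans
    (by rw [List.range_eq_range']; exact pvLoopA n n 0 (by omega))
  intro g k _
  simp only [pvStepN, Int.toNat_natCast, show (((n : Int)) - 1).toNat = n - 1 from by omega]

lemma pvB_eq (n : Nat) (hn : 1 ≤ n) : build_grid_empty_alt (n : Int) = pvGrid n n := by
  unfold build_grid_empty_alt
  rw [PySem.List.pyRange_zero_nat, List.foldl_map]
  have hbody : (fun (grid : List (List String)) (k : Nat) =>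
      if (k:Int) = 0 ∨ (k:Int) = (n:Int) - 1 then
        grid ++ [List.replicate ((n:Int)).toNat "#"]
      else
        grid ++ [((List.replicate ((n:Int)).toNat " ").set 0 "#").set
          (((n:Int)) - 1).toNat "#"])
      = (fun grid k => grid ++ [if k = 0 ∨ k = n - 1 then List.replicate n "#"
          else ((List.replicate n " ").set 0 "#").set (n - 1) "#"]) := by
    funext grid k
    have hc : ((k:Int) = 0 ∨ (k:Int) = (n:Int) - 1) ↔ (k = 0 ∨ k = n - 1) := by omega
    rw [show (((n:Int)) - 1).toNat = n - 1 from by omega]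
    simp only [Int.toNat_natCast]
    by_cases h : k = 0 ∨ k = n - 1
    · rw [if_pos (hc.mpr h), if_pos h]
    · rw [if_neg (fun hh => h (hc.mp hh)), if_neg h]
  rw [hbody, PySem.List.foldl_append_singleton_eq_map, List.nil_append]
  unfold pvGrid
  apply List.map_congr_left
  intro r hr
  rw [List.mem_range] at hr
  by_cases h : r = 0 ∨ r = n - 1
  · rw [if_pos h]
    rw [show (List.range n).map (fun c => pvCell n n r c) = (List.range n).map (fun _ => "#") from
      List.map_congr_left (fun c hc => by
        rw [List.mem_range] at hc; unfold pvCell; rw [if_pos (by omega)])]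
    simp [List.map_const']
  · rw [if_neg h]
    rw [show List.replicate n (" " : String) = (List.range n).map (fun _ => " ") from by
      simp [List.map_const']]
    rw [map_range_set n 0 (by omega), map_range_set n (n-1) (by omega)]
    apply List.map_congr_left
    intro c hc
    rw [List.mem_range] at hc
    unfold pvCell
    split_ifs <;> first | rfl | omega

-- ===== VERDICT (by name: the statement is the Claim_ definition above) =====
theorem build_grid_empty_spec : Claim_equal_build_grid_empty := by
  intro size _
  unfold Spec_build_grid_empty
  by_cases hs : size ≤ 0
  · simp [build_grid_empty, build_grid_empty_alt, PySem.List.pyRange_one_eq_nil hs]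
  · have hn : size = ((size.toNat : Nat) : Int) := by omega
    rw [hn, pvA_eq size.toNat (by omega), pvB_eq size.toNat (by omega)]
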